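-- pv_equiv track=rewrite | github.com/revilofe/revilofe.github.io | section1/u02/practica/otrosRecursos/soluciones/Practica005/src/ejercicio03.py | extraer_digitos_impares
-- ===== SOURCE A (Python) =====
-- def extraer_digitos_impares(numero: int) -> str:
--     """
--     Extrae y devuelve una cadena con los dígitos impares del número.
--
--     Args:
--         numero: El número a analizar
--
--     Returns:
--         str: Cadena con los dígitos impares separados por comas
--     """
--     if numero == 0:
--         return ""
--
--     # Trabajar con valor absoluto
--     numero_absoluto: int = numero if numero >= 0 else -numero
--
--     digitos_impares: str = ""
--
--     # Extraer dígitos de derecha a izquierda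
--     while numero_absoluto > 0:
--         digito: int = numero_absoluto % 10
--
--         if digito % 2 != 0:
--             # Añadir el dígito (convertido a string)
--             if digitos_impares == "":
--                 digitos_impares = str(digito)
--             else:
--                 # Añadir al principio para mantener el orden original
--                 digitos_impares = str(digito) + ", " + digitos_impares
--
--         numero_absoluto = numero_absoluto // 10
--
--     return digitos_impares
-- ===== SOURCE B (Python) =====
-- def extraer_digitos_impares(numero: int) -> str:
--     return ", ".join(c for c in str(abs(numero)) if c in "13579")
-- ===== Notes on version B (the rewrite author's own statement) =====
-- stated objective: idiomatic
-- what changed: Replaces the right-to-left modular digit extraction with its first-vs-rest prepend branch by a single left-to-right pass over str(abs(numero)) filtering odd digit characters and joining them with ', '.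
import Mathlib
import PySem

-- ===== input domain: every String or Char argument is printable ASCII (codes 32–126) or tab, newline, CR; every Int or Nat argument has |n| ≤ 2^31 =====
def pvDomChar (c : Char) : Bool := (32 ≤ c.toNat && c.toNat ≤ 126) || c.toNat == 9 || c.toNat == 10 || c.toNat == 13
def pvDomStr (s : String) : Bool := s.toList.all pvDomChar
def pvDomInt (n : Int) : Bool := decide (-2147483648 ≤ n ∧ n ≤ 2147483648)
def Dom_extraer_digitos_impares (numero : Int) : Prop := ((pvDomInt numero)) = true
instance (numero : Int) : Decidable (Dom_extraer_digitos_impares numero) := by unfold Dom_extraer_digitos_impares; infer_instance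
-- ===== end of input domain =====

-- B: one idiomatic left-to-right pass over str(abs(numero)) with a ', '.join, replacing
-- A's right-to-left modular extraction and first-vs-rest prepend branch; same return value.


-- ===== PORT A =====
-- the 'while numero_absoluto > 0' loop of A, state = (numero_absoluto, digitos_impares)
def pvLoopA (numero_absoluto : Int) (digitos_impares : String) : String :=
  if _h : numero_absoluto > 0 then
    let digito : Int := PySem.Int.mod numero_absoluto 10
    let digitos' : String :=
      if PySem.Int.mod digito 2 ≠ 0 then
        if digitos_impares = "" then PySem.Int.toStr digito
        else PySem.Int.toStr digito ++ ", " ++ digitos_impares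
      else digitos_impares
    pvLoopA (PySem.Int.floordiv numero_absoluto 10) digitos'
  else digitos_impares
termination_by numero_absoluto.toNat
decreasing_by
  simp only [PySem.Int.floordiv]
  have h1 : ((numero_absoluto.toNat / 10 : Nat) : Int) =
      ((numero_absoluto.toNat : Nat) : Int).fdiv ((10 : Nat) : Int) := Int.ofNat_fdiv _ _
  push_cast at h1
  have h2 : numero_absoluto = ((numero_absoluto.toNat : Nat) : Int) := by omega
  have h3 : numero_absoluto.toNat / 10 < numero_absoluto.toNat :=
    Nat.div_lt_self (by omega) (by norm_num)
  rw [h2]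
  omega

def extraer_digitos_impares (numero : Int) : String :=
  if numero = 0 then ""
  else
    let numero_absoluto : Int := if numero ≥ 0 then numero else -numero
    pvLoopA numero_absoluto ""

-- ===== PORT B =====
def extraer_digitos_impares_alt (numero : Int) : String :=
  PySem.Str.join ", "
    (((PySem.Int.toStr |numero|).toList.filter
        (fun c => PySem.Str.isIn (String.ofList [c]) "13579")).map
      (fun c => String.ofList [c]))

-- ===== PRECONDITION & SPEC =====
def Spec_extraer_digitos_impares (numero : Int) (out : String) : Prop := out = extraer_digitos_impares_alt numero
instance (numero : Int) (out : String) : Decidable (Spec_extraer_digitos_impares numero out) := by unfold Spec_extraer_digitos_impares; infer_instance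

-- ===== CLAIM (what is proved, stated in full; the proofs are below) =====
def Claim_equal_extraer_digitos_impares : Prop := ∀ (numero : Int), Dom_extraer_digitos_impares numero → Spec_extraer_digitos_impares numero (extraer_digitos_impares numero)

-- ===== LEMMAS AND PROOFS =====

-- the decimal digit characters of n, most significant first (= Nat.toDigits 10 n)
def pvSd (n : Nat) : List Char :=
  if h : n / 10 = 0 then [Nat.digitChar (n % 10)]
  else pvSd (n / 10) ++ [Nat.digitChar (n % 10)]
termination_by n
decreasing_by exact Nat.div_lt_self (by omega) (by norm_num)

-- B's filter predicate, named
def pvOdd (c : Char) : Bool := PySem.Str.isIn (String.ofList [c]) "13579"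

-- A's accumulator update, folded from the right over a digit-char list
def pvGlue (ds acc : List Char) : List Char :=
  ds.foldr (fun c a => if a = [] then [c] else c :: ',' :: ' ' :: a) acc

theorem pvToDigitsCore_eq : ∀ (fuel n : Nat) (acc : List Char), n < fuel →
    Nat.toDigitsCore 10 fuel n acc = pvSd n ++ acc := by
  intro fuel
  induction fuel with
  | zero => intro n acc h; omega
  | succ fuel ih =>
    intro n acc h
    rw [Nat.toDigitsCore]
    by_cases h10 : n / 10 = 0
    · simp [h10, pvSd]
    · have hn : 0 < n := by
        rcases Nat.eq_zero_or_pos n with h0 | h0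
        · subst h0; simp at h10
        · exact h0
      have : n / 10 < fuel := lt_of_lt_of_le (Nat.div_lt_self hn (by norm_num)) (by omega)
      simp only [h10, if_false]
      rw [ih (n / 10) ((n % 10).digitChar :: acc) this]
      conv_rhs => rw [pvSd]
      rw [dif_neg h10]
      simp

theorem pvToDigits_eq (n : Nat) : Nat.toDigits 10 n = pvSd n := by
  rw [Nat.toDigits, pvToDigitsCore_eq (n + 1) n [] (by omega), List.append_nil]

theorem pvOdd_digitChar (d : Nat) (h : d < 10) :
    pvOdd (Nat.digitChar d) = decide (d % 2 = 1) := by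
  interval_cases d <;> decide

theorem pvGlue_append (xs ys acc : List Char) :
    pvGlue (xs ++ ys) acc = pvGlue xs (pvGlue ys acc) := by
  simp [pvGlue, List.foldr_append]

theorem pvGlue_ne_nil (c : Char) (ds acc : List Char) : pvGlue (c :: ds) acc ≠ [] := by
  simp only [pvGlue, List.foldr_cons]
  split <;> simp

theorem pvSd_filter_step (m : Nat) :
    (pvSd m).filter pvOdd =
      (pvSd (m / 10)).filter pvOdd ++ [Nat.digitChar (m % 10)].filter pvOdd := by
  by_cases h10 : m / 10 = 0
  · rw [pvSd, dif_pos h10, h10]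
    have : pvSd 0 = ['0'] := by rw [pvSd]; decide
    rw [this]
    have : pvOdd '0' = false := by decide
    simp [List.filter, this]
  · rw [pvSd, dif_neg h10, List.filter_append]

theorem pvLoopA_eq (m : Nat) : ∀ acc : String,
    pvLoopA (m : Int) acc = String.ofList (pvGlue ((pvSd m).filter pvOdd) acc.toList) := by
  induction m using Nat.strong_induction_on with
  | _ m ih =>
    intro acc
    by_cases hm : 0 < m
    · rw [pvLoopA.eq_def, dif_pos (by exact_mod_cast hm)]
      have hmod : PySem.Int.mod (m : Int) 10 = ((m % 10 : Nat) : Int) := by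
        simp only [PySem.Int.mod]; exact_mod_cast (Int.ofNat_fmod m 10).symm
      have hdiv : PySem.Int.floordiv (m : Int) 10 = ((m / 10 : Nat) : Int) := by
        simp only [PySem.Int.floordiv]; exact_mod_cast (Int.ofNat_fdiv m 10).symm
      have hd10 : m % 10 < 10 := Nat.mod_lt _ (by norm_num)
      have htoStr : PySem.Int.toStr ((m % 10 : Nat) : Int) =
          String.ofList [Nat.digitChar (m % 10)] := by
        rw [PySem.Int.toStr, PySem.Int.toChars]
        rw [if_neg (by omega)]
        have : ((m % 10 : Nat) : Int).toNat = m % 10 := by omega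
        rw [this, pvToDigits_eq, pvSd, dif_pos (Nat.div_eq_of_lt hd10),
          Nat.mod_eq_of_lt hd10]
      have hmod2 : PySem.Int.mod ((m % 10 : Nat) : Int) 2 = ((m % 10 % 2 : Nat) : Int) := by
        simp only [PySem.Int.mod]; exact_mod_cast (Int.ofNat_fmod (m % 10) 2).symm
      simp only [hmod, hdiv, hmod2, htoStr]
      have ihm := ih (m / 10) (Nat.div_lt_self hm (by norm_num))
      rw [ihm]
      rw [pvSd_filter_step m, pvGlue_append]
      congr 1
      by_cases hodd : m % 10 % 2 = 1
      · have hpo : pvOdd (Nat.digitChar (m % 10)) = true := by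
          rw [pvOdd_digitChar _ hd10]; simp [hodd]
        have hc : ((m % 10 % 2 : Nat) : Int) ≠ 0 := by rw [hodd]; decide
        have hfil : List.filter pvOdd [(m % 10).digitChar] = [(m % 10).digitChar] := by
          simp [hpo]
        rw [if_pos hc, hfil]
        by_cases hacc : acc = ""
        · subst hacc
          rw [if_pos rfl]
          simp [pvGlue, String.toList_ofList]
        · have haccl : acc.toList ≠ [] := by
            intro h
            exact hacc (String.toList_inj.mp (by simp [h]))
          rw [if_neg hacc]
          simp only [pvGlue, List.foldr_cons, List.foldr_nil, if_neg haccl]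
          rw [String.toList_append, String.toList_append, String.toList_ofList]
          simp [show (", ").toList = [',', ' '] from by decide]
      · have h0 : m % 10 % 2 = 0 := by omega
        have hpo : pvOdd (Nat.digitChar (m % 10)) = false := by
          rw [pvOdd_digitChar _ hd10]; simp [h0]
        have hc : ¬ (((m % 10 % 2 : Nat) : Int) ≠ 0) := by rw [h0]; decide
        have hfil : List.filter pvOdd [(m % 10).digitChar] = [] := by simp [hpo]
        rw [if_neg hc, hfil]
        simp [pvGlue]
    · have hm0 : m = 0 := by omega
      subst hm0
      rw [pvLoopA.eq_def, dif_neg (by norm_num)]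
      have : (pvSd 0).filter pvOdd = [] := by rw [pvSd]; decide
      rw [this]
      simp [pvGlue, String.ofList_toList]

theorem pvGlue_join (ds : List Char) :
    pvGlue ds [] = PySem.Chars.join [',', ' '] (ds.map (fun c => [c])) := by
  induction ds with
  | nil => simp [pvGlue, PySem.Chars.join_nil]
  | cons c ds ih =>
    cases ds with
    | nil => simp [pvGlue, PySem.Chars.join_singleton]
    | cons c' ds' =>
      rw [List.map_cons, List.map_cons, PySem.Chars.join_cons_cons]
      simp only [List.map_cons] at ih
      rw [← ih]
      show (if pvGlue (c' :: ds') [] = [] then [c]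
            else c :: ',' :: ' ' :: pvGlue (c' :: ds') []) =
          [c] ++ [',', ' '] ++ pvGlue (c' :: ds') []
      rw [if_neg (pvGlue_ne_nil c' ds' [])]
      simp

theorem pvAlt_eq (numero : Int) :
    extraer_digitos_impares_alt numero =
      String.ofList (pvGlue ((pvSd numero.natAbs).filter pvOdd) []) := by
  rw [extraer_digitos_impares_alt]
  rw [← String.toList_inj, String.toList_ofList, PySem.Str.toList_join]
  have habs : |numero| = ((numero.natAbs : Nat) : Int) := by
    rw [Int.abs_eq_natAbs]
  have htl : (PySem.Int.toStr |numero|).toList = pvSd numero.natAbs := by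
    rw [habs, PySem.Int.toStr, PySem.Int.toChars, if_neg (by omega), String.toList_ofList]
    have : ((numero.natAbs : Nat) : Int).toNat = numero.natAbs := by omega
    rw [this, pvToDigits_eq]
  rw [htl, pvGlue_join]
  show PySem.Chars.join (", ").toList _ = _
  rw [show (", ").toList = [',', ' '] from by decide]
  congr 1
  rw [List.map_map]
  simp only [Function.comp_def, String.toList_ofList]
  rfl

-- ===== VERDICT (by name: the statement is the Claim_ definition above) =====
theorem extraer_digitos_impares_spec : Claim_equal_extraer_digitos_impares := by
  intro numero _
  show extraer_digitos_impares numero = extraer_digitos_impares_alt numero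
  rw [extraer_digitos_impares]
  by_cases h0 : numero = 0
  · subst h0; rw [if_pos rfl]; decide
  · rw [if_neg h0]
    have habs : (if numero ≥ 0 then numero else -numero) = ((numero.natAbs : Nat) : Int) := by
      split <;> omega
    rw [habs, pvLoopA_eq, pvAlt_eq]
    rfl
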